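-- pv_equiv track=rewrite | github.com/Fox-sys/ege-lessons | lesson_6/homework/f01.py | un_regular_result
-- ===== SOURCE A (Python) =====
-- def un_regular_result(info):
--     """Решение без регулярок"""
--     counter = 0
--     for i in info:
--         for j in range(len(i)-2):
--             if i[j] == 'A' and i[j+2] == 'R':
--                 counter += 1
--                 break
--     return counter
-- ===== SOURCE B (Python) =====
-- def un_regular_result(info):
--     """Count strings with an 'A' two positions before an 'R': per string, build the
--     set of 'A' positions and the set of 'R' positions shifted left by 2, and count
--     the string when the two sets intersect."""
--     counter = 0
--     for s in info:
--         a_pos = {i for i, c in enumerate(s) if c == 'A'}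
--         r_pos = {i - 2 for i, c in enumerate(s) if c == 'R'}
--         if a_pos & r_pos:
--             counter += 1
--     return counter
-- ===== Notes on version B (the rewrite author's own statement) =====
-- stated objective: alternative
-- what changed: Per string, instead of one indexed scan with break, B builds two index sets in separate passes (positions of 'A', positions of 'R' shifted by 2) and counts the string iff the sets intersect.
import Mathlib
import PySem

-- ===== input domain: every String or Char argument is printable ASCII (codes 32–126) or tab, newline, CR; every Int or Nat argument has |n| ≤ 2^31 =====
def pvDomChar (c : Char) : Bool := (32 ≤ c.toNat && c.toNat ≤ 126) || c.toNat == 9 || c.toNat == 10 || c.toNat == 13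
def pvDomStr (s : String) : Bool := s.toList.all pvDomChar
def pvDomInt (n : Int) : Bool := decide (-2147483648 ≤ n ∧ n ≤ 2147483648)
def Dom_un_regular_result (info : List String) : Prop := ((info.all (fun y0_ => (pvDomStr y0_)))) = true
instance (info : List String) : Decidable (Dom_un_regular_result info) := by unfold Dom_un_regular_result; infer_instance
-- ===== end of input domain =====

-- B replaces A's single indexed scan with break by two index-set passes per string
-- ('A' positions, 'R' positions shifted by 2) tested for intersection (alternative; same cost).

-- ===== PORT A =====
-- inner 'for j in range(len(i)-2): if …: counter += 1; break' — returns true as soon as the pattern is found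
def pvInnerA (s : List Char) : List Int → Bool
  | [] => false
  | j :: js =>
    if (PySem.List.pyGetD s j ' ' == 'A' && PySem.List.pyGetD s (j + 2) ' ' == 'R') then true
    else pvInnerA s js

def un_regular_result (info : List String) : Int :=
  info.foldl
    (fun counter i =>
      counter + (if pvInnerA i.toList (PySem.List.pyRange 0 ((i.toList.length : Int) - 2) 1) then 1 else 0))
    0

-- ===== PORT B =====
-- {i for i, c in enumerate(s) if c == 'A'}
def pvAPos (cs : List Char) : PySem.Set Int :=
  PySem.Set.ofList ((PySem.List.enumerate cs).filterMap (fun p => if p.2 = 'A' then some p.1 else none))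

-- {i - 2 for i, c in enumerate(s) if c == 'R'}
def pvRPos (cs : List Char) : PySem.Set Int :=
  PySem.Set.ofList ((PySem.List.enumerate cs).filterMap (fun p => if p.2 = 'R' then some (p.1 - 2) else none))

def un_regular_result_alt (info : List String) : Int :=
  info.foldl
    (fun counter s =>
      if PySem.Set.inter (pvAPos s.toList) (pvRPos s.toList) ≠ [] then counter + 1 else counter)
    0

-- ===== PRECONDITION & SPEC =====
def Spec_un_regular_result (info : List String) (out : Int) : Prop := out = un_regular_result_alt info
instance (info : List String) (out : Int) : Decidable (Spec_un_regular_result info out) := by unfold Spec_un_regular_result; infer_instance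

-- ===== CLAIM (what is proved, stated in full; the proofs are below) =====
def Claim_equal_un_regular_result : Prop := ∀ (info : List String), Dom_un_regular_result info → Spec_un_regular_result info (un_regular_result info)

-- ===== LEMMAS AND PROOFS =====

-- membership in the ported enumerate
theorem pv_mem_enumerate {α : Type} (cs : List α) (s : Int) (p : Int × α) :
    p ∈ PySem.List.enumerate cs s ↔ ∃ k : Nat, ∃ h : k < cs.length, p = (s + k, cs[k]) := by
  induction cs generalizing s with
  | nil => simp [PySem.List.enumerate_nil]
  | cons x xs ih =>
    rw [PySem.List.enumerate_cons, List.mem_cons, ih]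
    constructor
    · rintro (rfl | ⟨k, h, rfl⟩)
      · exact ⟨0, by simp, by simp⟩
      · refine ⟨k + 1, by simpa using h, ?_⟩
        simp only [List.getElem_cons_succ, Prod.mk.injEq]
        exact ⟨by push_cast; ring, by trivial⟩
    · rintro ⟨k, h, rfl⟩
      cases k with
      | zero => left; simp
      | succ k =>
        right
        refine ⟨k, by simpa using h, ?_⟩
        simp only [List.getElem_cons_succ, Prod.mk.injEq]
        exact ⟨by push_cast; ring, by trivial⟩

theorem pv_mem_aPos (cs : List Char) (x : Int) :
    x ∈ pvAPos cs ↔ ∃ k : Nat, k < cs.length ∧ x = (k : Int) ∧ cs[k]? = some 'A' := by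
  unfold pvAPos
  rw [PySem.Set.mem_ofList, List.mem_filterMap]
  constructor
  · rintro ⟨p, hp, hx⟩
    rw [pv_mem_enumerate] at hp
    obtain ⟨k, h, rfl⟩ := hp
    by_cases hA : cs[k] = 'A'
    · exact ⟨k, h, by simpa [hA] using hx.symm, by simp [List.getElem?_eq_getElem h, hA]⟩
    · simp [hA] at hx
  · rintro ⟨k, h, rfl, hA⟩
    rw [List.getElem?_eq_some_iff] at hA
    obtain ⟨h', hA⟩ := hA
    exact ⟨((k : Int), cs[k]), by rw [pv_mem_enumerate]; exact ⟨k, h, by simp⟩, by simp [hA]⟩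

theorem pv_mem_rPos (cs : List Char) (x : Int) :
    x ∈ pvRPos cs ↔ ∃ k : Nat, k < cs.length ∧ x = (k : Int) - 2 ∧ cs[k]? = some 'R' := by
  unfold pvRPos
  rw [PySem.Set.mem_ofList, List.mem_filterMap]
  constructor
  · rintro ⟨p, hp, hx⟩
    rw [pv_mem_enumerate] at hp
    obtain ⟨k, h, rfl⟩ := hp
    by_cases hR : cs[k] = 'R'
    · exact ⟨k, h, by simpa [hR] using hx.symm, by simp [List.getElem?_eq_getElem h, hR]⟩
    · simp [hR] at hx
  · rintro ⟨k, h, rfl, hR⟩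
    rw [List.getElem?_eq_some_iff] at hR
    obtain ⟨h', hR⟩ := hR
    exact ⟨((k : Int), cs[k]), by rw [pv_mem_enumerate]; exact ⟨k, h, by simp⟩, by simp [hR]⟩

-- A's break-loop is `any` over the index list
theorem pvInnerA_eq_any (s : List Char) (l : List Int) :
    pvInnerA s l = l.any (fun j => PySem.List.pyGetD s j ' ' == 'A' && PySem.List.pyGetD s (j + 2) ' ' == 'R') := by
  induction l with
  | nil => rfl
  | cons j js ih =>
    simp only [pvInnerA, List.any_cons, ih]
    split_ifs with h <;> simp [h]

-- per-string: A's inner scan hits iff B's two index sets intersect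
theorem pvInner_iff_inter (cs : List Char) :
    pvInnerA cs (PySem.List.pyRange 0 ((cs.length : Int) - 2) 1) = true
      ↔ PySem.Set.inter (pvAPos cs) (pvRPos cs) ≠ [] := by
  rw [pvInnerA_eq_any, List.any_eq_true]
  constructor
  · rintro ⟨j, hj, hp⟩
    rw [PySem.List.mem_pyRange_one] at hj
    obtain ⟨h0, h2⟩ := hj
    have hjlt : j < (cs.length : Int) := by omega
    have hj2 : j + 2 < (cs.length : Int) := by omega
    rw [PySem.List.pyGetD_eq_getElem _ _ h0 hjlt,
        PySem.List.pyGetD_eq_getElem _ _ (by omega) hj2, Bool.and_eq_true, beq_iff_eq, beq_iff_eq] at hp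
    obtain ⟨hA, hR⟩ := hp
    refine List.ne_nil_of_mem (a := j) ?_
    rw [PySem.Set.mem_inter]
    constructor
    · rw [pv_mem_aPos]
      exact ⟨j.toNat, by omega, by omega, by rw [List.getElem?_eq_getElem (by omega)]; exact congrArg some hA⟩
    · rw [pv_mem_rPos]
      refine ⟨(j + 2).toNat, by omega, by omega, ?_⟩
      rw [List.getElem?_eq_getElem (by omega)]
      exact congrArg some hR
  · intro h
    rcases List.exists_mem_of_ne_nil _ h with ⟨x, hx⟩
    rw [PySem.Set.mem_inter, pv_mem_aPos, pv_mem_rPos] at hx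
    obtain ⟨⟨ka, hka, hxa, hA⟩, ⟨kr, hkr, hxr, hR⟩⟩ := hx
    have hk : kr = ka + 2 := by omega
    subst hk
    have hA' : cs[ka]'hka = 'A' := by
      rw [List.getElem?_eq_getElem hka] at hA; exact Option.some_injective _ hA
    have hR' : cs[ka + 2]'hkr = 'R' := by
      rw [List.getElem?_eq_getElem hkr] at hR; exact Option.some_injective _ hR
    refine ⟨(ka : Int), ?_, ?_⟩
    · rw [PySem.List.mem_pyRange_one]; omega
    · have e2 : ((ka : Int) + 2) = ((ka + 2 : Nat) : Int) := by push_cast; ring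
      rw [e2, PySem.List.pyGetD_natCast, PySem.List.pyGetD_natCast]
      simp [List.getD_eq_getElem?_getD, hka, hkr, hA', hR']

theorem pvFold_eq (l : List String) (c : Int) :
    l.foldl (fun counter i =>
      counter + (if pvInnerA i.toList (PySem.List.pyRange 0 ((i.toList.length : Int) - 2) 1) then 1 else 0)) c
    = l.foldl (fun counter s =>
      if PySem.Set.inter (pvAPos s.toList) (pvRPos s.toList) ≠ [] then counter + 1 else counter) c := by
  induction l generalizing c with
  | nil => rfl
  | cons s rest ih =>
    rw [List.foldl_cons, List.foldl_cons, ih]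
    congr 1
    by_cases hI : PySem.Set.inter (pvAPos s.toList) (pvRPos s.toList) ≠ []
    · rw [if_pos hI, (pvInner_iff_inter s.toList).mpr hI, if_pos rfl]
    · rw [if_neg hI]
      have hA : pvInnerA s.toList (PySem.List.pyRange 0 ((s.toList.length : Int) - 2) 1) = false := by
        rcases Bool.eq_false_or_eq_true
          (pvInnerA s.toList (PySem.List.pyRange 0 ((s.toList.length : Int) - 2) 1)) with h | h
        · exact absurd ((pvInner_iff_inter s.toList).mp h) hI
        · exact h
      rw [hA]
      simp

-- ===== VERDICT (by name: the statement is the Claim_ definition above) =====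
theorem un_regular_result_spec : Claim_equal_un_regular_result := by
  intro info _
  unfold Spec_un_regular_result un_regular_result un_regular_result_alt
  exact pvFold_eq info 0
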